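-- pv_equiv track=rewrite | github.com/XiaoTaoWang/NeoLoopFinder | neoloop/visualize/bed.py | _remove_redundant_exons
-- ===== SOURCE A (Python) =====
-- def _remove_redundant_exons(exons):
--
--     pre_tree = {}
--     for e in exons:
--         if not e[0] in pre_tree:
--             pre_tree[e[0]] = []
--         pre_tree[e[0]].append(e[1])
--
--     pre_exon = {e:max(pre_tree[e]) for e in pre_tree}
--
--     nondup = []
--     cur = 0
--     for e in sorted(pre_exon):
--         if e < cur:
--             continue
--         nondup.append((e, pre_exon[e]))
--         cur = e + pre_exon[e]
--
--     return nondup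
-- ===== SOURCE B (Python) =====
-- def _remove_redundant_exons(exons):
--     # Sort once by (start asc, length desc); the first entry of each start run
--     # then carries that start's maximal length, so a keep-first-of-run pass
--     # dedupes by start, and a greedy cursor pass drops overlapping exons.
--     best = []
--     for e in sorted(exons, key=lambda x: (x[0], -x[1])):
--         if best and best[-1][0] == e[0]:
--             continue
--         best.append((e[0], e[1]))
--     nondup = []
--     cur = 0
--     for start, length in best:
--         if start < cur:
--             continue
--         nondup.append((start, length))
--         cur = start + length
--     return nondup
-- ===== Notes on version B (the rewrite author's own statement) =====
-- stated objective: simpler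
-- what changed: Replaces A's two dicts (group lengths by start, then max per start) with a single sort by (start asc, length desc) followed by a keep-first-of-run pass, feeding the same greedy cursor scan.
import Mathlib
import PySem

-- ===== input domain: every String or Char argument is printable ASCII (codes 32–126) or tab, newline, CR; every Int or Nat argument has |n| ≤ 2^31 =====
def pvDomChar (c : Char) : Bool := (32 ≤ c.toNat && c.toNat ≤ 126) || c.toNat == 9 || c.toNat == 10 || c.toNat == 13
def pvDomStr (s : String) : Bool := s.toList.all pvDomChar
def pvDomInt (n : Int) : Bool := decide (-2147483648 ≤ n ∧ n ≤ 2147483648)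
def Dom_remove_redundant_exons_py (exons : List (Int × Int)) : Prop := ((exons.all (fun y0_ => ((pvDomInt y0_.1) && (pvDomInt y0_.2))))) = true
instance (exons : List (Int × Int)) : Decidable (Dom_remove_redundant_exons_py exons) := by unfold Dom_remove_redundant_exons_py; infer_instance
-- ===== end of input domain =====

-- B replaces A's two dicts (group-by-start, then max-per-start) with one sort by
-- (start asc, length desc) plus a keep-first-of-run pass before the same greedy scan (objective: simpler).

-- ===== PORT A =====
-- `max(pre_tree[e])` is applied to a list that is non-empty by construction; the `.getD 0` default is never taken.
def remove_redundant_exons_py (exons : List (Int × Int)) : List (Int × Int) :=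
  let pre_tree : PySem.Dict Int (List Int) :=
    exons.foldl (fun d e =>
      (if d.contains e.1 then d else d.insert e.1 []).modify e.1 [] (fun l => l ++ [e.2]))
      PySem.Dict.empty
  let pre_exon : PySem.Dict Int Int :=
    pre_tree.keys.foldl (fun d e =>
      d.insert e ((PySem.List.max? (pre_tree.getD e []) (fun x => x)).getD 0))
      PySem.Dict.empty
  ((PySem.List.sorted pre_exon.keys (fun x => x) false).foldl
    (fun (acc : List (Int × Int) × Int) e =>
      if e < acc.2 then acc
      else (acc.1 ++ [(e, pre_exon.getD e 0)], e + pre_exon.getD e 0)) ([], 0)).1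

-- ===== PORT B =====
-- `best[-1]` is `PySem.List.pyGet? best (-1)`; the `best and …` short-circuit is the `none` branch.
def remove_redundant_exons_py_alt (exons : List (Int × Int)) : List (Int × Int) :=
  let best : List (Int × Int) :=
    (PySem.List.sorted2 exons (fun x => x.1) (fun x => -x.2) false).foldl
      (fun best e =>
        match PySem.List.pyGet? best (-1) with
        | some p => if p.1 == e.1 then best else best ++ [(e.1, e.2)]
        | none => best ++ [(e.1, e.2)]) []
  (best.foldl
    (fun (acc : List (Int × Int) × Int) e =>
      if e.1 < acc.2 then acc
      else (acc.1 ++ [(e.1, e.2)], e.1 + e.2)) ([], 0)).1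

-- ===== PRECONDITION & SPEC =====
def Spec_remove_redundant_exons_py (exons : List (Int × Int)) (out : List (Int × Int)) : Prop := out = remove_redundant_exons_py_alt exons
instance (exons : List (Int × Int)) (out : List (Int × Int)) : Decidable (Spec_remove_redundant_exons_py exons out) := by unfold Spec_remove_redundant_exons_py; infer_instance

-- ===== CLAIM (what is proved, stated in full; the proofs are below) =====
def Claim_equal_remove_redundant_exons_py : Prop := ∀ (exons : List (Int × Int)), Dom_remove_redundant_exons_py exons → Spec_remove_redundant_exons_py exons (remove_redundant_exons_py exons)

-- ===== LEMMAS AND PROOFS =====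

-- the maximal length recorded for start s (max over the lengths of exons with that start)
def pvM (exons : List (Int × Int)) (s : Int) : Int :=
  (PySem.List.max? ((exons.filter (fun p => p.1 == s)).map (fun p => p.2)) (fun x => x)).getD 0

-- the distinct starts, sorted ascending
def pvS (exons : List (Int × Int)) : List Int :=
  PySem.List.sorted (PySem.Set.ofList (exons.map (fun p => p.1))) (fun x => x) false

def pvCanon (exons : List (Int × Int)) : List (Int × Int) :=
  (pvS exons).map (fun s => (s, pvM exons s))

def pvGreedyStep (acc : List (Int × Int) × Int) (p : Int × Int) : List (Int × Int) × Int :=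
  if p.1 < acc.2 then acc else (acc.1 ++ [p], p.1 + p.2)

-- keep-first-of-run dedupe, parametrised by the last kept element
def pvDedup : Option (Int × Int) → List (Int × Int) → List (Int × Int)
  | _, [] => []
  | none, y :: ys => y :: pvDedup (some y) ys
  | some p, y :: ys => if p.1 == y.1 then pvDedup (some p) ys else y :: pvDedup (some y) ys

-- lexicographic ≤ on the key (start, -length)
def pvRle (a b : Int × Int) : Prop := a.1 < b.1 ∨ (a.1 = b.1 ∧ b.2 ≤ a.2)

def pvBLt (a b : Int × Int) : Bool :=
  decide (a.1 < b.1) || (!decide (b.1 < a.1) && decide (-a.2 < -b.2))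

lemma pv_pyGet_last {α : Type} (l : List α) : PySem.List.pyGet? l (-1) = l.getLast? := by
  cases l with
  | nil => rfl
  | cons a t =>
    simp [PySem.List.pyGet?, PySem.List.pyIdx?, List.getLast?_eq_getElem?]

lemma pv_modify_guard (d : PySem.Dict Int (List Int)) (k : Int) (v : Int) :
    (if d.contains k then d else d.insert k ([] : List Int)).modify k [] (fun l => l ++ [v])
      = d.modify k [] (fun l => l ++ [v]) := by
  by_cases h : d.contains k = true
  · simp [h]
  · have h' : d.contains k = false := by simpa using h
    simp only [h', Bool.false_eq_true, if_false, PySem.Dict.modify,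
      PySem.Dict.getD_insert_self, PySem.Dict.insert_insert_self,
      PySem.Dict.getD_of_not_contains d _ h']

lemma pv_sorted2_eq (exons : List (Int × Int)) :
    PySem.List.sorted2 exons (fun x => x.1) (fun x => -x.2) false
      = exons.foldl (fun acc x => PySem.List.insertBy pvBLt x acc) [] := rfl

lemma pv_insertBy_pairwise (x : Int × Int) (ys : List (Int × Int))
    (h : List.Pairwise pvRle ys) : List.Pairwise pvRle (PySem.List.insertBy pvBLt x ys) := by
  induction ys with
  | nil => simp [PySem.List.insertBy]
  | cons y ys ih =>
    rw [PySem.List.insertBy]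
    rcases List.pairwise_cons.mp h with ⟨hy, ht⟩
    by_cases hb : pvBLt x y = true
    · rw [if_pos hb]
      refine List.pairwise_cons.mpr ⟨?_, h⟩
      intro z hz
      rcases List.mem_cons.mp hz with rfl | hz
      · simp [pvBLt] at hb; unfold pvRle; omega
      · have := hy z hz
        simp [pvBLt] at hb; unfold pvRle at *; omega
    · rw [if_neg hb]
      refine List.pairwise_cons.mpr ⟨?_, ih ht⟩
      intro z hz
      rcases (PySem.List.mem_insertBy pvBLt x z ys).mp hz with rfl | hz
      · simp [pvBLt] at hb; unfold pvRle; omega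
      · exact hy z hz

lemma pv_foldl_insert_pairwise (xs : List (Int × Int)) :
    ∀ acc, List.Pairwise pvRle acc →
      List.Pairwise pvRle (xs.foldl (fun acc x => PySem.List.insertBy pvBLt x acc) acc) := by
  intro acc hacc
  induction xs generalizing acc with
  | nil => exact hacc
  | cons y ys ih => exact ih _ (pv_insertBy_pairwise y acc hacc)

lemma pv_srt_pairwise (exons : List (Int × Int)) :
    List.Pairwise pvRle (PySem.List.sorted2 exons (fun x => x.1) (fun x => -x.2) false) := by
  rw [pv_sorted2_eq]; exact pv_foldl_insert_pairwise exons [] List.Pairwise.nil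

lemma pv_dedup_subset : ∀ (ys : List (Int × Int)) (last : Option (Int × Int)) (x : Int × Int),
    x ∈ pvDedup last ys → x ∈ ys := by
  intro ys
  induction ys with
  | nil => intro last x hx; simp [pvDedup] at hx
  | cons y ys ih =>
    intro last x hx
    cases last with
    | none =>
      rw [pvDedup] at hx
      rcases List.mem_cons.mp hx with rfl | hx
      · exact List.mem_cons_self
      · exact List.mem_cons_of_mem _ (ih _ _ hx)
    | some p =>
      rw [pvDedup] at hx
      by_cases hpy : (p.1 == y.1) = true
      · rw [if_pos hpy] at hx
        exact List.mem_cons_of_mem _ (ih _ _ hx)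
      · rw [if_neg hpy] at hx
        rcases List.mem_cons.mp hx with rfl | hx
        · exact List.mem_cons_self
        · exact List.mem_cons_of_mem _ (ih _ _ hx)
lemma pv_dedup_gt : ∀ (ys : List (Int × Int)) (p : Int × Int),
    List.Pairwise pvRle ys → (∀ z ∈ ys, p.1 ≤ z.1) →
    ∀ x ∈ pvDedup (some p) ys, p.1 < x.1 := by
  intro ys
  induction ys with
  | nil => intro p _ _ x hx; simp [pvDedup] at hx
  | cons y ys ih =>
    intro p hp hle x hx
    rcases List.pairwise_cons.mp hp with ⟨hy, ht⟩
    rw [pvDedup] at hx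
    by_cases hpy : (p.1 == y.1) = true
    · rw [if_pos hpy] at hx
      exact ih p ht (fun z hz => hle z (List.mem_cons_of_mem _ hz)) x hx
    · rw [if_neg hpy] at hx
      have hpylt : p.1 < y.1 := by
        have := hle y List.mem_cons_self
        simp at hpy; omega
      rcases List.mem_cons.mp hx with rfl | hx
      · exact hpylt
      · have := ih y ht (fun z hz => by have := hy z hz; unfold pvRle at this; omega) x hx
        omega

lemma pv_dedup_pairwise : ∀ (ys : List (Int × Int)) (last : Option (Int × Int)),
    List.Pairwise pvRle ys →
    (∀ z ∈ ys, match last with | some p => p.1 ≤ z.1 | none => True) →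
    List.Pairwise (fun a b : Int × Int => a.1 < b.1) (pvDedup last ys) := by
  intro ys
  induction ys with
  | nil => intro last _ _; cases last <;> exact List.Pairwise.nil
  | cons y ys ih =>
    intro last hp hle
    rcases List.pairwise_cons.mp hp with ⟨hy, ht⟩
    have hyle : ∀ z ∈ ys, y.1 ≤ z.1 := fun z hz => by have := hy z hz; unfold pvRle at this; omega
    cases last with
    | none =>
      rw [pvDedup]
      exact List.pairwise_cons.mpr ⟨pv_dedup_gt ys y ht hyle, ih (some y) ht hyle⟩
    | some p =>
      rw [pvDedup]
      by_cases hpy : (p.1 == y.1) = true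
      · rw [if_pos hpy]
        exact ih (some p) ht (fun z hz => le_trans (hle y List.mem_cons_self) (hyle z hz))
      · rw [if_neg hpy]
        exact List.pairwise_cons.mpr ⟨pv_dedup_gt ys y ht hyle, ih (some y) ht hyle⟩

lemma pv_dedup_max : ∀ (ys : List (Int × Int)) (last : Option (Int × Int)),
    List.Pairwise pvRle ys →
    (∀ z ∈ ys, match last with | some p => p.1 ≤ z.1 | none => True) →
    ∀ x ∈ pvDedup last ys, ∀ y ∈ ys, y.1 = x.1 → y.2 ≤ x.2 := by
  intro ys
  induction ys with
  | nil => intro last _ _ x hx; simp [pvDedup] at hx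
  | cons y ys ih =>
    intro last hp hle x hx y' hy' heq
    rcases List.pairwise_cons.mp hp with ⟨hy, ht⟩
    have hyle : ∀ z ∈ ys, y.1 ≤ z.1 := fun z hz => by have := hy z hz; unfold pvRle at this; omega
    cases last with
    | none =>
      rw [pvDedup] at hx
      rcases List.mem_cons.mp hx with rfl | hx
      · -- x = y, first of run: pairwise gives bound
        rcases List.mem_cons.mp hy' with rfl | hy'
        · exact le_refl _
        · have := hy y' hy'; unfold pvRle at this; omega
      · have hgt := pv_dedup_gt ys y ht hyle x hx
        rcases List.mem_cons.mp hy' with rfl | hy'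
        · omega
        · exact ih (some y) ht hyle x hx y' hy' heq
    | some p =>
      rw [pvDedup] at hx
      by_cases hpy : (p.1 == y.1) = true
      · rw [if_pos hpy] at hx
        simp at hpy
        have hple : ∀ z ∈ ys, p.1 ≤ z.1 := fun z hz => hpy ▸ hyle z hz
        have hgt := pv_dedup_gt ys p ht hple x hx
        rcases List.mem_cons.mp hy' with rfl | hy'
        · omega
        · exact ih (some p) ht hple x hx y' hy' heq
      · rw [if_neg hpy] at hx
        rcases List.mem_cons.mp hx with rfl | hx
        · rcases List.mem_cons.mp hy' with rfl | hy'
          · exact le_refl _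
          · have := hy y' hy'; unfold pvRle at this; omega
        · have hgt := pv_dedup_gt ys y ht hyle x hx
          rcases List.mem_cons.mp hy' with rfl | hy'
          · omega
          · exact ih (some y) ht hyle x hx y' hy' heq

lemma pv_dedup_complete : ∀ (ys : List (Int × Int)) (last : Option (Int × Int)) (s : Int),
    (∃ l, (s, l) ∈ ys) →
    (match last with | some p => p.1 = s | none => False) ∨ ∃ x ∈ pvDedup last ys, x.1 = s := by
  intro ys
  induction ys with
  | nil => intro last s hs; rcases hs with ⟨l, hl⟩; simp at hl
  | cons y ys ih =>
    intro last s hs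
    rcases hs with ⟨l, hl⟩
    cases last with
    | none =>
      rw [pvDedup]
      rcases List.mem_cons.mp hl with heq | hl
      · exact Or.inr ⟨y, List.mem_cons_self, by rw [← heq]⟩
      · rcases ih (some y) s ⟨l, hl⟩ with h | ⟨x, hx, hxs⟩
        · exact Or.inr ⟨y, List.mem_cons_self, h⟩
        · exact Or.inr ⟨x, List.mem_cons_of_mem _ hx, hxs⟩
    | some p =>
      rw [pvDedup]
      by_cases hpy : (p.1 == y.1) = true
      · rw [if_pos hpy]
        simp at hpy
        rcases List.mem_cons.mp hl with heq | hl
        · exact Or.inl (by show p.1 = s; rw [hpy, ← heq])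
        · rcases ih (some p) s ⟨l, hl⟩ with h | ⟨x, hx, hxs⟩
          · exact Or.inl (by show p.1 = s; exact h)
          · exact Or.inr ⟨x, hx, hxs⟩
      · rw [if_neg hpy]
        rcases List.mem_cons.mp hl with heq | hl
        · exact Or.inr ⟨y, List.mem_cons_self, by rw [← heq]⟩
        · rcases ih (some y) s ⟨l, hl⟩ with h | ⟨x, hx, hxs⟩
          · exact Or.inr ⟨y, List.mem_cons_self, h⟩
          · exact Or.inr ⟨x, List.mem_cons_of_mem _ hx, hxs⟩

lemma pv_max_eq_of_ub {l : List Int} {v : Int} (hv : v ∈ l) (hub : ∀ w ∈ l, w ≤ v) :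
    (PySem.List.max? l (fun x => x)).getD 0 = v := by
  cases h : PySem.List.max? l (fun x => x) with
  | none =>
    rw [PySem.List.max?_eq_none_iff] at h
    subst h; simp at hv
  | some m =>
    have hm := PySem.List.max?_mem h
    have h1 := PySem.List.max?_isMax h v hv
    have h2 := hub m hm
    simp only [Option.getD_some]
    omega

lemma pv_dedup_val (exons : List (Int × Int)) :
    ∀ x ∈ pvDedup none (PySem.List.sorted2 exons (fun x => x.1) (fun x => -x.2) false),
      x ∈ exons ∧ x.2 = pvM exons x.1 := by
  intro x hx
  have hperm := PySem.List.sorted2_perm exons (fun x => x.1) (fun x => -x.2) false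
  have hxs : x ∈ exons := hperm.mem_iff.mp (pv_dedup_subset _ _ _ hx)
  have hmax := pv_dedup_max _ none (pv_srt_pairwise exons) (by intro z _; trivial) x hx
  refine ⟨hxs, ?_⟩
  unfold pvM
  apply Eq.symm
  apply pv_max_eq_of_ub
  · exact List.mem_map_of_mem (List.mem_filter.mpr ⟨hxs, by simp⟩)
  · intro w hw
    rcases List.mem_map.mp hw with ⟨q, hq, rfl⟩
    rcases List.mem_filter.mp hq with ⟨hq1, hq2⟩
    simp at hq2
    exact hmax q (hperm.mem_iff.mpr hq1) hq2

lemma pv_dedup_mem (exons : List (Int × Int)) (x : Int × Int) :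
    x ∈ pvDedup none (PySem.List.sorted2 exons (fun x => x.1) (fun x => -x.2) false)
      ↔ (x.1 ∈ exons.map (fun p => p.1) ∧ x.2 = pvM exons x.1) := by
  have hperm := PySem.List.sorted2_perm exons (fun x => x.1) (fun x => -x.2) false
  constructor
  · intro hx
    rcases pv_dedup_val exons x hx with ⟨h1, h2⟩
    exact ⟨List.mem_map_of_mem h1, h2⟩
  · rintro ⟨h1, h2⟩
    rcases List.mem_map.mp h1 with ⟨q, hq, hq1⟩
    have hmem : ∃ l, (x.1, l) ∈ PySem.List.sorted2 exons (fun x => x.1) (fun x => -x.2) false := by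
      refine ⟨q.2, ?_⟩
      have : q ∈ PySem.List.sorted2 exons (fun x => x.1) (fun x => -x.2) false :=
        hperm.mem_iff.mpr hq
      have hq2 : (x.1, q.2) = q := by rw [← hq1]
      rw [hq2]; exact this
    rcases pv_dedup_complete _ none x.1 hmem with h | ⟨y, hy, hys⟩
    · exact absurd h (by simp)
    · rcases pv_dedup_val exons y hy with ⟨_, hy2⟩
      have : x = y := by
        have : x.2 = y.2 := by rw [h2, hy2, hys]
        cases x; cases y
        simp_all
      rw [this]; exact hy

lemma pv_canon_mem (exons : List (Int × Int)) (x : Int × Int) :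
    x ∈ pvCanon exons ↔ (x.1 ∈ exons.map (fun p => p.1) ∧ x.2 = pvM exons x.1) := by
  unfold pvCanon pvS
  rw [List.mem_map]
  constructor
  · rintro ⟨s, hs, rfl⟩
    rw [PySem.List.mem_sorted] at hs
    rw [PySem.Set.mem_ofList] at hs
    exact ⟨hs, rfl⟩
  · rintro ⟨h1, h2⟩
    refine ⟨x.1, ?_, ?_⟩
    · rw [PySem.List.mem_sorted, PySem.Set.mem_ofList]; exact h1
    · cases x with
      | mk a b => simp at h2 ⊢; exact h2.symm

lemma pv_dedup_eq_canon (exons : List (Int × Int)) :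
    pvDedup none (PySem.List.sorted2 exons (fun x => x.1) (fun x => -x.2) false) = pvCanon exons := by
  have P1 : List.Pairwise (fun a b : Int × Int => a.1 < b.1)
      (pvDedup none (PySem.List.sorted2 exons (fun x => x.1) (fun x => -x.2) false)) :=
    pv_dedup_pairwise _ none (pv_srt_pairwise exons) (by intro z _; trivial)
  have P2 : List.Pairwise (fun a b : Int × Int => a.1 < b.1) (pvCanon exons) := by
    unfold pvCanon
    apply List.pairwise_map.mpr
    have := PySem.List.sorted_ofList_pairwise_lt (exons.map (fun p => p.1))
    exact this.imp (fun h => h)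
  have N1 := P1.imp (fun {a b} h => show a ≠ b by intro he; rw [he] at h; omega)
  have N2 := P2.imp (fun {a b} h => show a ≠ b by intro he; rw [he] at h; omega)
  apply List.Perm.eq_of_pairwise (le := fun a b : Int × Int => a.1 < b.1)
  · intro a b _ _ h1 h2; omega
  · exact P1
  · exact P2
  · apply List.perm_of_nodup_nodup_toFinset_eq N1 N2
    apply Finset.ext
    intro x
    simp only [List.mem_toFinset]
    rw [pv_dedup_mem, pv_canon_mem]

lemma pv_stepB_eq : (fun (best : List (Int × Int)) (e : Int × Int) =>
      match PySem.List.pyGet? best (-1) with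
      | some p => if p.1 == e.1 then best else best ++ [(e.1, e.2)]
      | none => best ++ [(e.1, e.2)])
    = (fun best e =>
      match best.getLast? with
      | some p => if p.1 == e.1 then best else best ++ [(e.1, e.2)]
      | none => best ++ [(e.1, e.2)]) := by
  funext best e; rw [pv_pyGet_last]

lemma pv_B_foldl (ys : List (Int × Int)) : ∀ (acc : List (Int × Int)),
    ys.foldl (fun best e =>
        match best.getLast? with
        | some p => if p.1 == e.1 then best else best ++ [(e.1, e.2)]
        | none => best ++ [(e.1, e.2)]) acc
      = acc ++ pvDedup acc.getLast? ys := by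
  induction ys with
  | nil => intro acc; simp [pvDedup]
  | cons y ys ih =>
    intro acc
    rw [List.foldl_cons]
    cases h : acc.getLast? with
    | none =>
      have hnil : acc = [] := List.getLast?_eq_none_iff.mp h
      subst hnil
      simp only [List.nil_append]
      rw [ih]
      simp [pvDedup]
    | some p =>
      simp only []
      by_cases hpy : (p.1 == y.1) = true
      · rw [if_pos hpy, ih, h, pvDedup, if_pos hpy]
      · rw [if_neg hpy, ih]
        have hlast : (acc ++ [(y.1, y.2)]).getLast? = some (y.1, y.2) := by simp
        rw [hlast, pvDedup, if_neg hpy, List.append_assoc]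
        rfl

lemma pv_B_eq_canon (exons : List (Int × Int)) :
    remove_redundant_exons_py_alt exons = ((pvCanon exons).foldl pvGreedyStep ([], 0)).1 := by
  unfold remove_redundant_exons_py_alt
  rw [pv_stepB_eq, pv_B_foldl]
  simp only [List.getLast?_nil, List.nil_append]
  rw [pv_dedup_eq_canon]
  rfl

lemma pv_A_eq_canon (exons : List (Int × Int)) :
    remove_redundant_exons_py exons = ((pvCanon exons).foldl pvGreedyStep ([], 0)).1 := by
  have hstep : (fun (d : PySem.Dict Int (List Int)) (e : Int × Int) =>
        (if d.contains e.1 then d else d.insert e.1 []).modify e.1 [] (fun l => l ++ [e.2]))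
      = (fun d e => d.modify e.1 [] (fun l => l ++ [e.2])) := by
    funext d e; exact pv_modify_guard d e.1 e.2
  simp only [remove_redundant_exons_py, hstep]
  set T := exons.foldl (fun d e => d.modify e.1 [] (fun l => l ++ [e.2])) PySem.Dict.empty with hT
  have hkeys : T.keys = PySem.Set.ofList (exons.map (fun p => p.1)) := by
    rw [hT]
    have := PySem.Dict.keys_foldl_modify_key exons (fun e => e.1) [] (fun _ e l => l ++ [e.2])
      PySem.Dict.empty
    rw [PySem.Dict.keys_empty] at this
    exact this
  have hnd : T.keys.Nodup := by
    rw [hT]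
    exact PySem.Dict.nodup_keys_foldl_modify_key exons (fun e => e.1) [] (fun _ e l => l ++ [e.2])
      PySem.Dict.empty (by rw [PySem.Dict.keys_empty]; exact List.nodup_nil)
  have hg : ∀ s, T.getD s [] = (exons.filter (fun p => p.1 == s)).map (fun p => p.2) := by
    intro s
    rw [hT]
    have := PySem.Dict.getD_foldl_modify_append exons PySem.Dict.empty s
    rwa [PySem.Dict.getD_empty, List.nil_append] at this
  set E := T.keys.foldl (fun d e =>
      d.insert e ((PySem.List.max? (T.getD e []) (fun x => x)).getD 0)) PySem.Dict.empty with hE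
  have hitems : E.items = T.keys.map (fun k => (k, pvM exons k)) := by
    rw [hE]
    have h0 := PySem.Dict.items_foldl_insert_fresh T.keys (fun a => a)
      (fun e => (PySem.List.max? (T.getD e []) (fun x => x)).getD 0) PySem.Dict.empty
      (fun a _ => PySem.Dict.contains_empty a) (by simpa using hnd)
    rw [h0]
    rw [show (PySem.Dict.empty : PySem.Dict Int Int).items = [] from rfl, List.nil_append]
    apply List.map_congr_left
    intro k _
    show (k, (PySem.List.max? (T.getD k []) fun x => x).getD 0) = (k, pvM exons k)
    rw [hg k]
    rfl
  have hEkeys : E.keys = T.keys := by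
    simp only [PySem.Dict.keys, hitems, List.map_map]
    simp
  have hEnd : E.keys.Nodup := by rw [hEkeys]; exact hnd
  have hEg : ∀ k ∈ T.keys, E.getD k 0 = pvM exons k := by
    intro k hk
    exact PySem.Dict.getD_of_mem_items E
      (by rw [hitems]; exact List.mem_map_of_mem hk) hEnd 0
  have hS : PySem.List.sorted E.keys (fun x => x) false = pvS exons := by
    rw [hEkeys, hkeys]; rfl
  rw [PySem.List.foldl_congr_mem _ _
    (fun (acc : List (Int × Int) × Int) e =>
      if e < acc.2 then acc else (acc.1 ++ [(e, pvM exons e)], e + pvM exons e)) _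
    (by
      intro acc e he
      rw [PySem.List.mem_sorted, hEkeys] at he
      rw [hEg e he])]
  rw [hS]
  unfold pvCanon
  rw [List.foldl_map]
  rfl

-- ===== VERDICT (by name: the statement is the Claim_ definition above) =====
theorem remove_redundant_exons_py_spec : Claim_equal_remove_redundant_exons_py := by
  intro exons _
  unfold Spec_remove_redundant_exons_py
  rw [pv_A_eq_canon, pv_B_eq_canon]
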